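-- pv_equiv track=rewrite | github.com/lollihunter/Tester | 77.py | solve
-- ===== SOURCE A (Python) =====
-- def solve(a, n, m):
--     sss1 = set()
--     sss2 = set()
--
--     for i in range(n):
--         local_m = [i, 0]
--         for j in range(m):
--             if a[i][j] > a[local_m[0]][local_m[1]]:
--                 local_m[0] = i
--                 local_m[1] = j
--
--         sss1.add(tuple(local_m))
--
--     for j in range(m):
--         local_m = [0, j]
--         for i in range(n):
--             if a[i][j] > a[local_m[0]][local_m[1]]:
--                 local_m[0] = i
--                 local_m[1] = j
--
--         sss2.add(tuple(local_m))
--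
--     return len(sss1 & sss2)
-- ===== SOURCE B (Python) =====
-- def solve(a, n, m):
--     # Candidate verification: each row nominates its leftmost maximum; count it
--     # iff it is also the topmost maximum of its column (checked via max/index).
--     if n <= 0 or m <= 0:
--         return 0
--     rows = [row[:m] for row in a[:n]]
--     cnt = 0
--     for i in range(n):
--         v = max(rows[i])
--         j = rows[i].index(v)
--         col = [rows[k][j] for k in range(n)]
--         if max(col) == v and col.index(v) == i:
--             cnt += 1
--     return cnt
-- ===== Notes on version B (the rewrite author's own statement) =====
-- stated objective: alternative
-- what changed: Instead of scanning every row and every column with strict-> argmax loops and intersecting two sets of (row,col) pairs, B verifies candidates value-wise: each row nominates its leftmost maximum via the max()/index() built-ins, extracts just that one column, and counts the nomination iff the value is also the column's maximum and first occurs there (topmost).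
import Mathlib
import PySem

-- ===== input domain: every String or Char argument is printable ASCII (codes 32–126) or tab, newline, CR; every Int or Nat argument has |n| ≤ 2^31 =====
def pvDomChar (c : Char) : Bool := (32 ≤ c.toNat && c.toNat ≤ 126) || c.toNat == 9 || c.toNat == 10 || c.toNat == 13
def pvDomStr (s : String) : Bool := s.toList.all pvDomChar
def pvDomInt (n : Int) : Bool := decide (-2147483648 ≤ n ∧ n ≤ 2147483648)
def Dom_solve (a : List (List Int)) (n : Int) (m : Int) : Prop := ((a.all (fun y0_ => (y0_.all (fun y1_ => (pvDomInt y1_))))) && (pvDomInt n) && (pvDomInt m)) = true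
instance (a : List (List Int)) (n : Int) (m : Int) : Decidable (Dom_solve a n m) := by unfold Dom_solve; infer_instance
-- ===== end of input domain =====

-- B verifies candidates instead of tabulating argmaxes: each row nominates its leftmost maximum
-- via max()/index(), and the cell is counted iff it is also the topmost maximum of its column
-- (alternative decomposition, value-based, similar cost).


-- ===== PORT A =====
-- a[i][j] (in-range under Pre_solve; out of range Python raises, which Pre_solve excludes)
def pvAt (a : List (List Int)) (i j : Int) : Int :=
  PySem.List.pyGetD (PySem.List.pyGetD a i []) j 0

-- inner row loop: local_m = [i, 0]; for j in range(m): if a[i][j] > a[local_m[0]][local_m[1]]: local_m = [i, j]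
def solveRowA (a : List (List Int)) (m : Int) (i : Int) : Int × Int :=
  (PySem.List.pyRange 0 m 1).foldl
    (fun loc j => if pvAt a i j > pvAt a loc.1 loc.2 then (i, j) else loc) (i, 0)

-- inner column loop: local_m = [0, j]; for i in range(n): if a[i][j] > a[local_m[0]][local_m[1]]: local_m = [i, j]
def solveColA (a : List (List Int)) (n : Int) (j : Int) : Int × Int :=
  (PySem.List.pyRange 0 n 1).foldl
    (fun loc i => if pvAt a i j > pvAt a loc.1 loc.2 then (i, j) else loc) (0, j)

def solve (a : List (List Int)) (n : Int) (m : Int) : Int :=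
  let sss1 : PySem.Set (Int × Int) :=
    (PySem.List.pyRange 0 n 1).foldl (fun s i => PySem.Set.add s (solveRowA a m i)) PySem.Set.empty
  let sss2 : PySem.Set (Int × Int) :=
    (PySem.List.pyRange 0 m 1).foldl (fun s j => PySem.Set.add s (solveColA a n j)) PySem.Set.empty
  PySem.Set.len (PySem.Set.inter sss1 sss2)

-- ===== PORT B =====
def solve_alt (a : List (List Int)) (n : Int) (m : Int) : Int :=
  if n ≤ 0 ∨ m ≤ 0 then 0
  else
    -- rows = [row[:m] for row in a[:n]]
    let rows : List (List Int) :=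
      (PySem.List.slice a none (some n)).map (fun row => PySem.List.slice row none (some m))
    (PySem.List.pyRange 0 n 1).foldl (fun cnt i =>
      let r := PySem.List.pyGetD rows i []
      -- max(rows[i]) and rows[i].index(v): nonempty / present under Pre_solve (else Python raises)
      let v := (PySem.List.max? r (fun x => x)).getD 0
      let j : Nat := (PySem.List.index? r v).getD 0
      -- col = [rows[k][j] for k in range(n)]
      let col := (PySem.List.pyRange 0 n 1).map (fun k =>
        PySem.List.pyGetD (PySem.List.pyGetD rows k []) (j : Int) 0)
      if (PySem.List.max? col (fun x => x)).getD 0 = v ∧ ((PySem.List.index? col v).getD 0 : Int) = i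
      then cnt + 1 else cnt) 0

-- ===== PRECONDITION & SPEC =====
-- Pre_solve: exactly A's return domain — when both n and m are positive the n×m prefix of the
-- grid must exist (otherwise A's a[i][j] raises IndexError); with n ≤ 0 or m ≤ 0 A touches no cell.
def Pre_solve (a : List (List Int)) (n : Int) (m : Int) : Prop :=
  0 < n → 0 < m → n ≤ (a.length : Int) ∧ ∀ row ∈ a.take n.toNat, m ≤ (row.length : Int)
instance (a : List (List Int)) (n : Int) (m : Int) : Decidable (Pre_solve a n m) := by
  unfold Pre_solve; infer_instance
def pvWitness_solve : List (List Int) × Int × Int := ([[1, 2], [3, 4]], 2, 2)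

def Spec_solve (a : List (List Int)) (n : Int) (m : Int) (out : Int) : Prop := out = solve_alt a n m
instance (a : List (List Int)) (n : Int) (m : Int) (out : Int) : Decidable (Spec_solve a n m out) := by unfold Spec_solve; infer_instance

-- ===== CLAIM (what is proved, stated in full; the proofs are below) =====
def Claim_equal_solve : Prop := ∀ (a : List (List Int)) (n : Int) (m : Int), Dom_solve a n m → Pre_solve a n m → Spec_solve a n m (solve a n m)

-- ===== LEMMAS AND PROOFS =====

-- proof-side helper: leftmost strict-> argmax scan shared by both characterizations
def rowBest (a : List (List Int)) (m : Int) (i : Int) : Int :=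
  (PySem.List.pyRange 1 m 1).foldl
    (fun best j => if pvAt a i j > pvAt a i best then j else best) 0

def colBest (a : List (List Int)) (n : Int) (j : Int) : Int :=
  (PySem.List.pyRange 1 n 1).foldl
    (fun best i => if pvAt a i j > pvAt a best j then i else best) 0

-- characterization of the strict-> left-to-right argmax scan starting at index 0
theorem strictFold_char (g : Int → Int) (N : Int) (hN : 1 ≤ N) :
    0 ≤ ((PySem.List.pyRange 1 N 1).foldl (fun best j => if g j > g best then j else best) 0) ∧
    ((PySem.List.pyRange 1 N 1).foldl (fun best j => if g j > g best then j else best) 0) < N ∧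
    (∀ t : Int, 0 ≤ t → t < N →
      g t ≤ g ((PySem.List.pyRange 1 N 1).foldl (fun best j => if g j > g best then j else best) 0)) ∧
    (∀ t : Int, 0 ≤ t →
      t < ((PySem.List.pyRange 1 N 1).foldl (fun best j => if g j > g best then j else best) 0) →
      g t < g ((PySem.List.pyRange 1 N 1).foldl (fun best j => if g j > g best then j else best) 0)) := by
  induction N, hN using Int.le_induction with
  | base =>
    rw [PySem.List.pyRange_one_eq_nil le_rfl]
    refine ⟨le_rfl, by norm_num, ?_, ?_⟩
    · intro t h0 h1; have : t = 0 := by omega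
      simp [this, List.foldl]
    · intro t h0 h1; simp [List.foldl] at h1; omega
  | succ N hN ih =>
    rw [PySem.List.pyRange_one_succ_right hN, List.foldl_append]
    obtain ⟨ih0, ih1, ihmax, ihlt⟩ := ih
    set r := (PySem.List.pyRange 1 N 1).foldl (fun best j => if g j > g best then j else best) 0 with hr
    simp only [List.foldl_cons, List.foldl_nil]
    by_cases h : g N > g r
    · rw [if_pos h]
      refine ⟨by omega, by omega, ?_, ?_⟩
      · intro t h0 h1
        rcases lt_or_eq_of_le (by omega : t ≤ N) with ht | ht
        · exact le_of_lt (lt_of_le_of_lt (ihmax t h0 ht) h)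
        · rw [ht]
      · intro t h0 h1
        exact lt_of_le_of_lt (ihmax t h0 (by omega)) h
    · rw [if_neg h]
      refine ⟨ih0, by omega, ?_, ihlt⟩
      intro t h0 h1
      rcases lt_or_eq_of_le (by omega : t ≤ N) with ht | ht
      · exact ihmax t h0 ht
      · rw [ht]; omega

-- (PySem.List.max? l id).getD 0 = g r when l lists g over [0, N) and r is the argmax
theorem max_getD_of_char (l : List Int) (g : Int → Int) (r : Int)
    (hne : l ≠ [])
    (hval : ∀ (k : Nat) (hk : k < l.length), l[k] = g (k : Int))
    (hrlo : 0 ≤ r) (hrhi : r < (l.length : Int))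
    (hmax : ∀ t : Int, 0 ≤ t → t < (l.length : Int) → g t ≤ g r) :
    (PySem.List.max? l (fun x => x)).getD 0 = g r := by
  obtain ⟨M, hM⟩ : ∃ M, PySem.List.max? l (fun x => x) = some M := by
    cases hx : PySem.List.max? l (fun x => x) with
    | none => exact absurd ((PySem.List.max?_eq_none_iff _ _).mp hx) hne
    | some M => exact ⟨M, rfl⟩
  rw [hM, Option.getD_some]
  have hMmem := PySem.List.max?_mem hM
  obtain ⟨k, hk, hkM⟩ := List.mem_iff_getElem.mp hMmem
  have hMle : M ≤ g r := by
    rw [← hkM, hval k hk]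
    exact hmax (k : Int) (by positivity) (by exact_mod_cast hk)
  have hge : g r ≤ M := by
    have hrl : r.toNat < l.length := by omega
    have : l[r.toNat] = g r := by
      rw [hval r.toNat hrl]; congr 1; omega
    have hmem : g r ∈ l := this ▸ List.getElem_mem hrl
    simpa using PySem.List.max?_isMax hM _ hmem
  omega

-- PySem.List.index? l (g r) = some r.toNat when r is the leftmost index of the value g r
theorem index?_of_char (l : List Int) (g : Int → Int) (r : Int)
    (hval : ∀ (k : Nat) (hk : k < l.length), l[k] = g (k : Int))
    (hrlo : 0 ≤ r) (hrhi : r < (l.length : Int))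
    (hlt : ∀ t : Int, 0 ≤ t → t < r → g t < g r) :
    PySem.List.index? l (g r) = some r.toNat := by
  have hrl : r.toNat < l.length := by omega
  have hgetr : l[r.toNat] = g r := by rw [hval r.toNat hrl]; congr 1; omega
  rw [PySem.List.index?_eq_some_iff]
  refine ⟨l.take r.toNat, l.drop (r.toNat + 1), ?_, ?_, ?_⟩
  · rw [← hgetr, ← List.drop_eq_getElem_cons hrl, List.take_append_drop]
  · simp [List.length_take]; omega
  · intro hmem
    obtain ⟨k, hk, hkv⟩ := List.mem_iff_getElem.mp hmem
    have hkl : k < r.toNat := by rw [List.length_take] at hk; omega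
    have : l[k] = g r := by rw [← hkv, List.getElem_take]
    rw [hval k (by omega)] at this
    have := hlt (k : Int) (by positivity) (by omega)
    omega

-- ---------- A-side reduction (sets of argmax pairs → a countP over rows) ----------

-- A's row loop keeps first component i; its second component is the rowBest scan
theorem rowPair (a : List (List Int)) (i : Int) (l : List Int) : ∀ b : Int,
    l.foldl (fun loc j => if pvAt a i j > pvAt a loc.1 loc.2 then (i, j) else loc) (i, b)
      = (i, l.foldl (fun best j => if pvAt a i j > pvAt a i best then j else best) b) := by
  induction l with
  | nil => intro b; rfl
  | cons x t ih =>
    intro b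
    simp only [List.foldl_cons]
    by_cases h : pvAt a i x > pvAt a i b <;> simp [h, ih]

theorem solveRowA_eq (a : List (List Int)) (m i : Int) (hm : 0 < m) :
    solveRowA a m i = (i, rowBest a m i) := by
  unfold solveRowA rowBest
  rw [PySem.List.pyRange_one_cons hm]
  simp only [List.foldl_cons, gt_iff_lt, lt_self_iff_false, if_false]
  exact rowPair a i _ 0

-- A's column loop keeps second component j; its first component is the colBest scan
theorem colPair (a : List (List Int)) (j : Int) (l : List Int) : ∀ b : Int,
    l.foldl (fun loc i => if pvAt a i j > pvAt a loc.1 loc.2 then (i, j) else loc) (b, j)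
      = (l.foldl (fun best i => if pvAt a i j > pvAt a best j then i else best) b, j) := by
  induction l with
  | nil => intro b; rfl
  | cons x t ih =>
    intro b
    simp only [List.foldl_cons]
    by_cases h : pvAt a x j > pvAt a b j <;> simp [h, ih]

theorem solveColA_eq (a : List (List Int)) (n j : Int) (hn : 0 < n) :
    solveColA a n j = (colBest a n j, j) := by
  unfold solveColA colBest
  rw [PySem.List.pyRange_one_cons hn]
  simp only [List.foldl_cons, gt_iff_lt, lt_self_iff_false, if_false]
  exact colPair a j _ 0

-- sss1 as a plain list of (i, leftmost row argmax)
theorem sss1_eq (a : List (List Int)) (n m : Int) (hm : 0 < m) :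
    (PySem.List.pyRange 0 n 1).foldl (fun s i => PySem.Set.add s (solveRowA a m i)) PySem.Set.empty
      = (PySem.List.pyRange 0 n 1).map (fun i => (i, rowBest a m i)) := by
  have hc := PySem.List.foldl_congr_mem
      (l := PySem.List.pyRange 0 n 1) (init := (PySem.Set.empty : PySem.Set (Int × Int)))
      (f := fun s i => PySem.Set.add s (solveRowA a m i))
      (g := fun s i => PySem.Set.add s (i, rowBest a m i))
      (by intro acc x hx; simp only [solveRowA_eq a m x hm])
  rw [hc]
  have h1 : (PySem.List.pyRange 0 n 1).foldl (fun s i => PySem.Set.add s (i, rowBest a m i)) PySem.Set.empty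
      = ((PySem.List.pyRange 0 n 1).map (fun i => (i, rowBest a m i))).foldl PySem.Set.add PySem.Set.empty := by
    rw [List.foldl_map]
  have h2 : (PySem.Set.empty : PySem.Set (Int × Int)) = [] := rfl
  rw [h1, h2, ← PySem.Set.ofList_eq_foldl]
  apply PySem.Set.ofList_eq_self_of_nodup
  exact List.Nodup.map (fun x y h => congrArg Prod.fst h) (PySem.List.nodup_pyRange_one 0 n)

-- sss2 as a plain list of (topmost column argmax, j)
theorem sss2_eq (a : List (List Int)) (n m : Int) (hn : 0 < n) :
    (PySem.List.pyRange 0 m 1).foldl (fun s j => PySem.Set.add s (solveColA a n j)) PySem.Set.empty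
      = (PySem.List.pyRange 0 m 1).map (fun j => (colBest a n j, j)) := by
  have hc := PySem.List.foldl_congr_mem
      (l := PySem.List.pyRange 0 m 1) (init := (PySem.Set.empty : PySem.Set (Int × Int)))
      (f := fun s j => PySem.Set.add s (solveColA a n j))
      (g := fun s j => PySem.Set.add s (colBest a n j, j))
      (by intro acc x hx; simp only [solveColA_eq a n x hn])
  rw [hc]
  have h1 : (PySem.List.pyRange 0 m 1).foldl (fun s j => PySem.Set.add s (colBest a n j, j)) PySem.Set.empty
      = ((PySem.List.pyRange 0 m 1).map (fun j => (colBest a n j, j))).foldl PySem.Set.add PySem.Set.empty := by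
    rw [List.foldl_map]
  have h2 : (PySem.Set.empty : PySem.Set (Int × Int)) = [] := rfl
  rw [h1, h2, ← PySem.Set.ofList_eq_foldl]
  apply PySem.Set.ofList_eq_self_of_nodup
  exact List.Nodup.map (fun x y h => congrArg Prod.snd h) (PySem.List.nodup_pyRange_one 0 m)

theorem rowBest_char (a : List (List Int)) (m i : Int) (hm : 0 < m) :
    0 ≤ rowBest a m i ∧ rowBest a m i < m ∧
    (∀ t : Int, 0 ≤ t → t < m → pvAt a i t ≤ pvAt a i (rowBest a m i)) ∧
    (∀ t : Int, 0 ≤ t → t < rowBest a m i → pvAt a i t < pvAt a i (rowBest a m i)) :=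
  strictFold_char (fun j => pvAt a i j) m hm

theorem colBest_char (a : List (List Int)) (n j : Int) (hn : 0 < n) :
    0 ≤ colBest a n j ∧ colBest a n j < n ∧
    (∀ t : Int, 0 ≤ t → t < n → pvAt a t j ≤ pvAt a (colBest a n j) j) ∧
    (∀ t : Int, 0 ≤ t → t < colBest a n j → pvAt a t j < pvAt a (colBest a n j) j) :=
  strictFold_char (fun i => pvAt a i j) n hn

theorem mem_sss2_iff (a : List (List Int)) (n m i : Int) (hm : 0 < m) :
    ((i, rowBest a m i) ∈ (PySem.List.pyRange 0 m 1).map (fun j => (colBest a n j, j)))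
      ↔ colBest a n (rowBest a m i) = i := by
  obtain ⟨hb0, hb1, -, -⟩ := rowBest_char a m i hm
  constructor
  · rintro h
    rw [List.mem_map] at h
    obtain ⟨j, _, hj⟩ := h
    obtain ⟨h1, h2⟩ := Prod.mk.injEq .. ▸ hj
    rw [← h2]
    exact h1
  · intro h
    rw [List.mem_map]
    exact ⟨rowBest a m i, PySem.List.mem_pyRange_one.2 ⟨hb0, hb1⟩, by rw [h]⟩

-- A's value as a count of coincidences over the rows
theorem solve_eq_countP (a : List (List Int)) (n m : Int) (hn : 0 < n) (hm : 0 < m) :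
    solve a n m
      = ((PySem.List.pyRange 0 n 1).countP
          (fun i => decide (colBest a n (rowBest a m i) = i)) : Int) := by
  unfold solve
  rw [sss1_eq a n m hm, sss2_eq a n m hn]
  simp only [PySem.Set.inter, PySem.Set.len]
  rw [← List.countP_eq_length_filter, List.countP_map]
  congr 1
  apply List.countP_congr
  intro i hi
  simp only [Function.comp]
  rw [PySem.Set.contains_eq_listContains]
  simp only [List.contains_iff_mem ..]
  simp only [decide_eq_true_eq]
  exact mem_sss2_iff a n m i hm


-- the row list rows[i] lists pvAt a i over [0, m)
theorem rowlist_spec (a : List (List Int)) (n m : Int) (i : Int)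
    (hlen : n ≤ (a.length : Int))
    (hrows : ∀ row ∈ a.take n.toNat, m ≤ ((row.length : Nat) : Int))
    (hi0 : 0 ≤ i) (hin : i < n) :
    (PySem.List.pyGetD ((a.take n.toNat).map (fun row => row.take m.toNat)) i []).length = m.toNat
    ∧ ∀ (k : Nat) (hk : k < (PySem.List.pyGetD ((a.take n.toNat).map (fun row => row.take m.toNat)) i []).length),
        (PySem.List.pyGetD ((a.take n.toNat).map (fun row => row.take m.toNat)) i [])[k] = pvAt a i (k : Int) := by
  have hRlen : ((a.take n.toNat).map (fun row => row.take m.toNat)).length = n.toNat := by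
    simp [List.length_take]; omega
  have hiR : i.toNat < ((a.take n.toNat).map (fun row => row.take m.toNat)).length := by omega
  have hg : PySem.List.pyGetD ((a.take n.toNat).map (fun row => row.take m.toNat)) i []
      = ((a.take n.toNat).map (fun row => row.take m.toNat))[i.toNat] :=
    PySem.List.pyGetD_eq_getElem _ _ hi0 (by omega)
  have hiT : i.toNat < (a.take n.toNat).length := by
    simp [List.length_take]; omega
  have hia : i.toNat < a.length := by omega
  have htake : (a.take n.toNat)[i.toNat] = a[i.toNat] := List.getElem_take
  have hmem : a[i.toNat] ∈ a.take n.toNat := htake ▸ List.getElem_mem hiT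
  have hmrow : m ≤ (a[i.toNat].length : Int) := hrows _ hmem
  rw [hg, List.getElem_map, htake]
  constructor
  · rw [List.length_take]; omega
  · intro k hk
    rw [List.length_take] at hk
    have hk' : k < m.toNat := by omega
    have hka : k < a[i.toNat].length := by omega
    rw [List.getElem_take]
    unfold pvAt
    rw [PySem.List.pyGetD_eq_getElem _ _ hi0 (by omega),
        PySem.List.pyGetD_eq_getElem _ _ (by positivity) (by omega)]
    simp

-- the column list built by B lists pvAt · j over [0, n)
theorem collist_spec (a : List (List Int)) (n m : Int) (j : Int)
    (hlen : n ≤ (a.length : Int))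
    (hrows : ∀ row ∈ a.take n.toNat, m ≤ ((row.length : Nat) : Int))
    (hj0 : 0 ≤ j) (hjm : j < m) :
    ((PySem.List.pyRange 0 n 1).map (fun k =>
        PySem.List.pyGetD (PySem.List.pyGetD ((a.take n.toNat).map (fun row => row.take m.toNat)) k []) j 0)).length = n.toNat
    ∧ ∀ (k : Nat) (hk : k < ((PySem.List.pyRange 0 n 1).map (fun k =>
        PySem.List.pyGetD (PySem.List.pyGetD ((a.take n.toNat).map (fun row => row.take m.toNat)) k []) j 0)).length),
        ((PySem.List.pyRange 0 n 1).map (fun k =>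
        PySem.List.pyGetD (PySem.List.pyGetD ((a.take n.toNat).map (fun row => row.take m.toNat)) k []) j 0))[k]
          = pvAt a (k : Int) j := by
  have hlength : ((PySem.List.pyRange 0 n 1).map (fun k =>
      PySem.List.pyGetD (PySem.List.pyGetD ((a.take n.toNat).map (fun row => row.take m.toNat)) k []) j 0)).length = n.toNat := by
    rw [List.length_map, PySem.List.length_pyRange_one]; omega
  refine ⟨hlength, ?_⟩
  intro k hk
  rw [hlength] at hk
  rw [List.getElem_map, PySem.List.getElem_pyRange_one]
  have hk0 : (0 : Int) ≤ 0 + (k : Int) := by positivity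
  have hkn : 0 + (k : Int) < n := by omega
  obtain ⟨hrl, hrv⟩ := rowlist_spec a n m (0 + (k : Int)) hlen hrows hk0 hkn
  have hjlen : j < ((PySem.List.pyGetD ((a.take n.toNat).map (fun row => row.take m.toNat)) (0 + (k : Int)) []).length : Int) := by
    rw [hrl]; omega
  rw [PySem.List.pyGetD_eq_getElem _ _ hj0 hjlen]
  rw [hrv j.toNat (by omega)]
  have : ((j.toNat : Nat) : Int) = j := by omega
  rw [this]
  simp

-- ===== VERDICT (by name: the statement is the Claim_ definition above) =====
theorem solve_spec : Claim_equal_solve := by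
  intro a n m _ hpre
  unfold Spec_solve
  by_cases hdeg : n ≤ 0 ∨ m ≤ 0
  · -- no rows or no columns: one of A's two sets stays empty, so the intersection is empty
    simp only [solve_alt]
    rw [if_pos hdeg]
    unfold solve
    rcases hdeg with h | h
    · rw [PySem.List.pyRange_one_eq_nil h]
      simp [PySem.Set.inter, PySem.Set.len]
    · rw [PySem.List.pyRange_one_eq_nil h]
      simp [PySem.Set.inter, PySem.Set.len]
  · rw [not_or, not_le, not_le] at hdeg
    obtain ⟨hn, hm⟩ := hdeg
    obtain ⟨hlen, hrows⟩ := hpre hn hm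
    -- rows = the n×m prefix of a
    have hrows_eq : (PySem.List.slice a none (some n)).map (fun row => PySem.List.slice row none (some m))
        = (a.take n.toNat).map (fun row => row.take m.toNat) := by
      rw [PySem.List.slice_to a (by omega)]
      apply List.map_congr_left
      intro row _
      rw [PySem.List.slice_to row (by omega)]
    simp only [solve_alt]
    rw [if_neg (by omega)]
    simp only [hrows_eq]
    rw [PySem.List.foldl_ite_add_one]
    rw [zero_add, solve_eq_countP a n m hn hm]
    congr 1
    apply List.countP_congr
    intro i hi
    obtain ⟨hi0, hin⟩ := PySem.List.mem_pyRange_one.mp hi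
    simp only [decide_eq_true_eq]
    -- row i's data
    obtain ⟨hrl, hrv⟩ := rowlist_spec a n m i hlen hrows hi0 hin
    obtain ⟨hb0, hb1, hbmax, hblt⟩ := rowBest_char a m i hm
    -- B's v = the row maximum value = pvAt a i (rowBest a m i)
    have hv : (PySem.List.max? (PySem.List.pyGetD ((a.take n.toNat).map (fun row => row.take m.toNat)) i []) (fun x => x)).getD 0
        = pvAt a i (rowBest a m i) := by
      apply max_getD_of_char _ (fun t => pvAt a i t) _
        (by intro h; rw [h] at hrl; simp at hrl; omega) hrv hb0 (by rw [hrl]; omega)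
      intro t h0 h1
      exact hbmax t h0 (by rw [hrl] at h1; omega)
    -- B's j = the leftmost index of that maximum = (rowBest a m i).toNat
    have hjv : PySem.List.index? (PySem.List.pyGetD ((a.take n.toNat).map (fun row => row.take m.toNat)) i [])
        (pvAt a i (rowBest a m i)) = some (rowBest a m i).toNat := by
      apply index?_of_char _ (fun t => pvAt a i t) _ hrv hb0 (by rw [hrl]; omega) hblt
    simp only [hv, hjv, Option.getD_some, Int.toNat_of_nonneg hb0]
    -- column data at j = rowBest a m i
    obtain ⟨hcl, hcv⟩ := collist_spec a n m (rowBest a m i) hlen hrows hb0 hb1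
    obtain ⟨hc0, hc1, hcmax, hclt⟩ := colBest_char a n (rowBest a m i) hn
    have hmaxcol : (PySem.List.max? ((PySem.List.pyRange 0 n 1).map (fun k =>
        PySem.List.pyGetD (PySem.List.pyGetD ((a.take n.toNat).map (fun row => row.take m.toNat)) k []) (rowBest a m i) 0)) (fun x => x)).getD 0
        = pvAt a (colBest a n (rowBest a m i)) (rowBest a m i) := by
      apply max_getD_of_char _ (fun t => pvAt a t (rowBest a m i)) _
        (by intro h; rw [h] at hcl; simp at hcl; omega) hcv hc0 (by rw [hcl]; omega)
      intro t h0 h1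
      exact hcmax t h0 (by rw [hcl] at h1; omega)
    have hidxcol : PySem.List.index? ((PySem.List.pyRange 0 n 1).map (fun k =>
        PySem.List.pyGetD (PySem.List.pyGetD ((a.take n.toNat).map (fun row => row.take m.toNat)) k []) (rowBest a m i) 0))
        (pvAt a (colBest a n (rowBest a m i)) (rowBest a m i)) = some (colBest a n (rowBest a m i)).toNat := by
      apply index?_of_char _ (fun t => pvAt a t (rowBest a m i)) _ hcv hc0 (by rw [hcl]; omega) hclt
    simp only [hmaxcol]
    constructor
    · -- A counts the row: the topmost column argmax is i itself
      intro h
      refine ⟨by rw [h], ?_⟩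
      rw [show pvAt a i (rowBest a m i) = pvAt a (colBest a n (rowBest a m i)) (rowBest a m i) by rw [h]]
      rw [hidxcol]
      simp
      omega
    · rintro ⟨h1, h2⟩
      rw [← h1, hidxcol] at h2
      simp at h2
      omega
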